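-- pv_equiv track=rewrite | github.com/EdenBelouadah/Medical-Adverse-Reactions-Detection-Using-CRF-Wapiti | main.py | read_sentences
-- ===== SOURCE A (Python) =====
-- def read_sentences(corpus):
--     sentence=[]
--     sentences=[]
--     for line in corpus:
--         if(line!="\n"):
--             word = line.split("\t")[0]
--             sentence.append(word)
--         else:
--             sentences.append(sentence)
--             sentence=[]
--     sentences.append(sentence)
--     return sentences
-- ===== SOURCE B (Python) =====
-- def read_sentences(corpus):
--     lines = list(corpus)
--     boundaries = [i for i, l in enumerate(lines) if l == "\n"]
--     sentences = []
--     start = 0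
--     for b in boundaries + [len(lines)]:
--         sentences.append([l.split("\t")[0] for l in lines[start:b]])
--         start = b + 1
--     return sentences
-- ===== Notes on version B (the rewrite author's own statement) =====
-- stated objective: alternative
-- what changed: Replaces the single-pass accumulate-and-reset loop by a two-phase scheme: first collect the indices of all blank-line delimiters, then slice the line list between consecutive boundaries (with len(lines) as sentinel) and map each slice to its first tab field.
import Mathlib
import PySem

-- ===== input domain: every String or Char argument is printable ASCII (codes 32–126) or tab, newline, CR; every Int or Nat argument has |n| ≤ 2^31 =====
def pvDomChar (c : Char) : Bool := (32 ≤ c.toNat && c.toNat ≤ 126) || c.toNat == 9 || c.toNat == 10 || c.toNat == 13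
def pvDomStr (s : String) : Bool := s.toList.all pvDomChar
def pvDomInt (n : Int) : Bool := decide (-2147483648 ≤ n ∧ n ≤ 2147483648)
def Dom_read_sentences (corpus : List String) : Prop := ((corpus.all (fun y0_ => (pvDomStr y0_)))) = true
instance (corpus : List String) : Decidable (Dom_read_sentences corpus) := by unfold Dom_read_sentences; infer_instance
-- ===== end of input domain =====

-- B replaces A's accumulate-and-reset pass by a two-phase 'collect blank-line indices, then slice between boundaries' scheme; same cost, equal output proved below.

-- line.split("\t")[0]; Python's split always returns a nonempty list, so [0] never raises (headD's default is dead)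
def pvFirstField (line : String) : String := ((PySem.Str.split? line "\t").getD []).headD ""

-- ===== PORT A =====
def read_sentences (corpus : List String) : List (List String) :=
  let st := corpus.foldl
    (fun (st : List String × List (List String)) line =>
      if line ≠ "\n" then (st.1 ++ [pvFirstField line], st.2)
      else ([], st.2 ++ [st.1]))
    ([], [])
  st.2 ++ [st.1]

-- ===== PORT B =====
def read_sentences_alt (corpus : List String) : List (List String) :=
  let lines := corpus
  let boundaries : List Int :=
    (PySem.List.enumerate lines).filterMap (fun p => if p.2 = "\n" then some p.1 else none)
  let res := (boundaries ++ [(lines.length : Int)]).foldl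
    (fun (st : Int × List (List String)) b =>
      (b + 1, st.2 ++ [(PySem.List.slice lines (some st.1) (some b)).map pvFirstField]))
    ((0 : Int), [])
  res.2

-- ===== PRECONDITION & SPEC =====
def Spec_read_sentences (corpus : List String) (out : List (List String)) : Prop := out = read_sentences_alt corpus
instance (corpus : List String) (out : List (List String)) : Decidable (Spec_read_sentences corpus out) := by unfold Spec_read_sentences; infer_instance

-- ===== CLAIM (what is proved, stated in full; the proofs are below) =====
def Claim_equal_read_sentences : Prop := ∀ (corpus : List String), Dom_read_sentences corpus → Spec_read_sentences corpus (read_sentences corpus)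

-- ===== LEMMAS AND PROOFS =====

-- canonical segmentation both ports are reduced to
def pvSegs : List String → List (List String)
  | [] => [[]]
  | l :: rest =>
    if l = "\n" then [] :: pvSegs rest
    else
      match pvSegs rest with
      | [] => [[pvFirstField l]]
      | s :: ss => (pvFirstField l :: s) :: ss

def pvConsHead (x : List String) : List (List String) → List (List String)
  | [] => [x]
  | s :: ss => (x ++ s) :: ss

theorem pvSegs_ne_nil (xs : List String) : pvSegs xs ≠ [] := by
  cases xs with
  | nil => simp [pvSegs]
  | cons l rest =>
    by_cases h : l = "\n"
    · simp [pvSegs, h]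
    · cases hseg : pvSegs rest <;> simp [pvSegs, h, hseg]

theorem a_loop (corpus : List String) (sent : List String) (sents : List (List String)) :
    (corpus.foldl
      (fun (st : List String × List (List String)) line =>
        if line ≠ "\n" then (st.1 ++ [pvFirstField line], st.2)
        else ([], st.2 ++ [st.1]))
      (sent, sents)).2 ++
    [(corpus.foldl
      (fun (st : List String × List (List String)) line =>
        if line ≠ "\n" then (st.1 ++ [pvFirstField line], st.2)
        else ([], st.2 ++ [st.1]))
      (sent, sents)).1] = sents ++ pvConsHead sent (pvSegs corpus) := by
  induction corpus generalizing sent sents with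
  | nil => simp [pvSegs, pvConsHead]
  | cons l rest ih =>
    by_cases h : l = "\n"
    · subst h
      simp only [List.foldl_cons]
      rw [if_neg (fun hc => hc rfl)]
      rw [ih]
      have hne := pvSegs_ne_nil rest
      cases hseg : pvSegs rest with
      | nil => exact absurd hseg hne
      | cons s ss => simp [pvSegs, pvConsHead, hseg]
    · simp only [List.foldl_cons, if_pos h]
      rw [ih]
      have hne := pvSegs_ne_nil rest
      cases hseg : pvSegs rest with
      | nil => exact absurd hseg hne
      | cons s ss => simp [pvSegs, pvConsHead, hseg, if_neg h]

-- boundary indices of the suffix, with absolute offset k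
def pvBounds : List String → Nat → List Int
  | [], _ => []
  | l :: rest, k => (if l = "\n" then [(k : Int)] else []) ++ pvBounds rest (k + 1)

theorem bounds_eq_filterMap (xs : List String) (k : Nat) :
    (PySem.List.enumerate xs (k : Int)).filterMap
      (fun p => if p.2 = "\n" then some p.1 else none) = pvBounds xs k := by
  induction xs generalizing k with
  | nil => simp [PySem.List.enumerate_nil, pvBounds]
  | cons l rest ih =>
    rw [PySem.List.enumerate_cons, List.filterMap_cons]
    have hcast : ((k : Int) + 1) = ((k + 1 : Nat) : Int) := by push_cast; ring
    rw [hcast, ih]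
    by_cases h : l = "\n" <;> simp [pvBounds, h]

theorem slice_take_step (lines : List String) (s k : Nat) (l : String)
    (hd : lines.drop k = l :: (lines.drop (k + 1))) (hs : s ≤ k) :
    PySem.List.slice lines (some (s : Int)) (some ((k + 1 : Nat) : Int)) =
    PySem.List.slice lines (some (s : Int)) (some ((k : Int))) ++ [l] := by
  rw [show ((k : Int)) = ((k : Nat) : Int) from rfl]
  rw [PySem.List.slice_natCast, PySem.List.slice_natCast]
  have h1 : k + 1 - s = (k - s) + 1 := by omega
  rw [h1, List.take_add_one]
  have h2 : (lines.drop s)[k - s]? = some l := by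
    rw [List.getElem?_drop]
    have h3 : s + (k - s) = k + 0 := by omega
    rw [h3, ← List.getElem?_drop, hd]
    simp
  simp [h2]

theorem b_loop (rest : List String) (lines : List String) (s k : Nat)
    (acc : List (List String)) (hd : lines.drop k = rest) (hs : s ≤ k) :
    ((pvBounds rest k ++ [(lines.length : Int)]).foldl
      (fun (st : Int × List (List String)) b =>
        (b + 1, st.2 ++ [(PySem.List.slice lines (some st.1) (some b)).map pvFirstField]))
      ((s : Int), acc)).2 =
    acc ++ pvConsHead ((PySem.List.slice lines (some (s : Int)) (some (k : Int))).map pvFirstField)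
      (pvSegs rest) := by
  induction rest generalizing s k acc with
  | nil =>
    have hk : lines.length ≤ k := by
      have := congrArg List.length hd
      simp only [List.length_drop, List.length_nil] at this
      omega
    have hslice : PySem.List.slice lines (some (s : Int)) (some ((lines.length : Nat) : Int)) =
        PySem.List.slice lines (some (s : Int)) (some ((k : Int))) := by
      rw [show ((k : Int)) = ((k : Nat) : Int) from rfl]
      rw [PySem.List.slice_natCast, PySem.List.slice_natCast]
      rw [List.take_of_length_le (by simp only [List.length_drop]; omega),
          List.take_of_length_le (by simp only [List.length_drop]; omega)]
    simp [pvBounds, pvSegs, pvConsHead, hslice]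
  | cons l rest' ih =>
    have hd' : lines.drop (k + 1) = rest' := by
      rw [← List.drop_drop]; simp [hd]
    have hcast : ((k : Int) + 1) = ((k + 1 : Nat) : Int) := by push_cast; ring
    by_cases h : l = "\n"
    · subst h
      rw [show pvBounds ("\n" :: rest') k = (k : Int) :: pvBounds rest' (k + 1) from by
        simp [pvBounds]]
      rw [List.cons_append, List.foldl_cons]
      simp only [hcast]
      rw [ih (k + 1) (k + 1) _ hd' (le_refl _)]
      have hempty : PySem.List.slice lines (some ((k + 1 : Nat) : Int)) (some ((k + 1 : Nat) : Int)) = ([] : List String) := by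
        rw [PySem.List.slice_natCast]; simp
      have hne := pvSegs_ne_nil rest'
      cases hseg : pvSegs rest' with
      | nil => exact absurd hseg hne
      | cons ss sss =>
        have hsegcons : pvSegs ("\n" :: rest') = [] :: ss :: sss := by simp [pvSegs, hseg]
        rw [hempty, hsegcons]
        simp [pvConsHead]
    · rw [show pvBounds (l :: rest') k = pvBounds rest' (k + 1) from by
        simp [pvBounds, h]]
      rw [ih s (k + 1) acc hd' (by omega)]
      have hstep := slice_take_step lines s k l (by rw [hd, hd']) hs
      have hne := pvSegs_ne_nil rest'
      cases hseg : pvSegs rest' with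
      | nil => exact absurd hseg hne
      | cons ss sss =>
        have hsegcons : pvSegs (l :: rest') = (pvFirstField l :: ss) :: sss := by
          simp [pvSegs, h, hseg]
        rw [hstep, hsegcons]
        simp [pvConsHead]

-- ===== VERDICT (by name: the statement is the Claim_ definition above) =====
theorem read_sentences_spec : Claim_equal_read_sentences := by
  intro corpus _
  unfold Spec_read_sentences read_sentences read_sentences_alt
  have hb := bounds_eq_filterMap corpus 0
  have hB := b_loop corpus corpus 0 0 [] (by simp) (le_refl _)
  have hempty : PySem.List.slice corpus (some ((0 : Nat) : Int)) (some ((0 : Nat) : Int)) = ([] : List String) := by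
    rw [PySem.List.slice_natCast]; simp
  rw [hempty] at hB
  simp only [Nat.cast_zero] at hb hB
  have hA := a_loop corpus [] []
  have hne := pvSegs_ne_nil corpus
  cases hseg : pvSegs corpus with
  | nil => exact absurd hseg hne
  | cons s ss =>
    simp only [hb, hB, hA, hseg, pvConsHead, List.map_nil, List.nil_append]
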